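-- pv_equiv track=rewrite | github.com/tomasz-mizak/ProjectEuler-Solutions | problem005.py | smallest
-- ===== SOURCE A (Python) =====
-- def smallest(r, s):
--     n = 1
--     while (n <= r):
--         c = 0
--         for d in range(1,s+1):
--             if (n % d != 0):
--                 break
--             else:
--                 if (d == s):
--                     return n
--         n += 1
--     return -1
-- ===== SOURCE B (Python) =====
-- def smallest(r, s):
--     # Compute L = lcm(1..s) incrementally (Euclid's gcd); the first n >= 1
--     # divisible by all of 1..s is L. Partial lcms only grow, so stop with -1
--     # as soon as the running L exceeds r; else return final L if <= r.
--     if s < 1: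
--         return -1
--     L = 1
--     for d in range(2, s + 1):
--         if L > r:
--             return -1
--         a, b = L, d
--         while b:
--             a, b = b, a % b
--         L = L * d // a
--     return L if L <= r else -1
-- ===== Notes on version B (the rewrite author's own statement) =====
-- stated objective: faster
-- what changed: Replaces A's linear scan of every n in [1,r] (each trial-divided by 1..s) with one incremental computation of lcm(1..s) via Euclid's gcd, returning -1 as soon as the monotone running lcm exceeds r and the final lcm otherwise.
import Mathlib
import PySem

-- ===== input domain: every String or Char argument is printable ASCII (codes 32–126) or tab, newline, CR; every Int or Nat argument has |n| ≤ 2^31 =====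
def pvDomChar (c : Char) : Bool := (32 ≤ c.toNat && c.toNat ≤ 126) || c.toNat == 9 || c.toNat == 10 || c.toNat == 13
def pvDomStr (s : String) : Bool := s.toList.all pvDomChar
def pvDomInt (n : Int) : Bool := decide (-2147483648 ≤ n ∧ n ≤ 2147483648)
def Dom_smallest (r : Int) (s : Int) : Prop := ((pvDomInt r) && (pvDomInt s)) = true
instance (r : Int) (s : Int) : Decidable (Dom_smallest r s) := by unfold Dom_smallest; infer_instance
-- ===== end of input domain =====

-- B replaces A's scan of every n in [1,r] (each trial-divided by 1..s) with one
-- computation of lcm(1..s) via Euclid's gcd, returned directly if ≤ r, else -1.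

-- ===== PORT A =====
-- inner 'for d in range(1, s+1)' with break / 'return n' (some = early return);
-- Python's range is lazy, so d is stepped directly; the Nat fuel counts the
-- remaining range elements (s+1-d) and is only a totality guard
def pvInnerA (n : Int) (s : Int) : Int → Nat → Option Int
  | _, 0 => none
  | d, fuel + 1 =>
    if PySem.Int.mod n d ≠ 0 then none
    else if d = s then some n
    else pvInnerA n s (d + 1) fuel

-- the 'while n <= r' loop (the loop variable c of A is dead and dropped);
-- fuel counts the remaining iterations r+1-n, again only a totality guard
def pvLoopA (r : Int) (s : Int) : Int → Nat → Int
  | _, 0 => -1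
  | n, fuel + 1 =>
    match pvInnerA n s 1 (s + 1 - 1).toNat with
    | some v => v
    | none => pvLoopA r s (n + 1) fuel

def smallest (r : Int) (s : Int) : Int := pvLoopA r s 1 (r + 1 - 1).toNat

-- ===== PORT B =====
-- termination fact for the hand-written Euclid loop in Source B
theorem pvMod_natAbs_lt (a b : Int) (h : b ≠ 0) :
    (PySem.Int.mod a b).natAbs < b.natAbs := by
  rcases lt_or_gt_of_ne h with hb | hb
  · have := PySem.Int.mod_neg_bounds a hb
    omega
  · have h1 := PySem.Int.mod_nonneg a hb
    have h2 := PySem.Int.mod_lt a hb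
    omega

-- 'a, b = L, d; while b: a, b = b, a % b' — returns final a
def pvEuclid (a : Int) (b : Int) : Int :=
  if h : b ≠ 0 then pvEuclid b (PySem.Int.mod a b) else a
termination_by b.natAbs
decreasing_by exact pvMod_natAbs_lt a b h

-- 'for d in range(2, s+1): if L > r: return -1; L = L*d // gcd(L,d)' then the
-- final test; range is lazy, so d is stepped directly under a fuel of s+1-d
def pvLoopB (r : Int) (s : Int) : Int → Int → Nat → Int
  | L, _, 0 => if L ≤ r then L else -1
  | L, d, fuel + 1 =>
    if L > r then -1
    else pvLoopB r s (PySem.Int.floordiv (L * d) (pvEuclid L d)) (d + 1) fuel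

def smallest_alt (r : Int) (s : Int) : Int :=
  if s < 1 then -1
  else pvLoopB r s 1 2 (s + 1 - 2).toNat

-- ===== PRECONDITION & SPEC =====
def Spec_smallest (r : Int) (s : Int) (out : Int) : Prop := out = smallest_alt r s
instance (r : Int) (s : Int) (out : Int) : Decidable (Spec_smallest r s out) := by unfold Spec_smallest; infer_instance

-- ===== CLAIM (what is proved, stated in full; the proofs are below) =====
def Claim_equal_smallest : Prop := ∀ (r : Int) (s : Int), Dom_smallest r s → Spec_smallest r s (smallest r s)

-- ===== LEMMAS AND PROOFS =====

-- lcm(1..k), the mathematical yardstick both sides are compared with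
def pvNL : Nat → Nat
  | 0 => 1
  | k + 1 => Nat.lcm (pvNL k) (k + 1)

theorem pvNL_pos (k : Nat) : 0 < pvNL k := by
  induction k with
  | zero => simp [pvNL]
  | succ k ih => exact Nat.lcm_pos ih (Nat.succ_pos k)

theorem pvNL_dvd (k d : Nat) (h1 : 1 ≤ d) (h2 : d ≤ k) : d ∣ pvNL k := by
  induction k with
  | zero => omega
  | succ k ih =>
    rcases Nat.lt_or_ge d (k + 1) with h | h
    · exact dvd_trans (ih (by omega)) (Nat.dvd_lcm_left _ _)
    · have hd : d = k + 1 := by omega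
      subst hd
      exact Nat.dvd_lcm_right _ _

theorem pvDvd_NL (k m : Nat) (h : ∀ d, 1 ≤ d → d ≤ k → d ∣ m) : pvNL k ∣ m := by
  induction k with
  | zero => simp [pvNL]
  | succ k ih =>
    exact Nat.lcm_dvd (ih fun d h1 h2 => h d h1 (by omega)) (h (k + 1) (by omega) (by omega))

theorem pvGcd_rec (a b : Int) : Int.gcd a b = Int.gcd b (a % b) := by
  conv_rhs => rw [Int.emod_def, mul_comm]
  rw [Int.gcd_comm a b, Int.gcd_sub_mul_right_right]

theorem pvEuclid_eq (N : Nat) : ∀ (a b : Int), b.natAbs ≤ N → 0 ≤ a → 0 ≤ b →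
    pvEuclid a b = (Int.gcd a b : Int) := by
  induction N with
  | zero =>
    intro a b hN ha _
    have hb0 : b = 0 := by omega
    subst hb0
    rw [pvEuclid]
    simp [Int.gcd, Int.natAbs_of_nonneg ha]
  | succ N ih =>
    intro a b hN ha hb
    by_cases h : b = 0
    · subst h
      rw [pvEuclid]
      simp [Int.gcd, Int.natAbs_of_nonneg ha]
    · have hb' : 0 < b := lt_of_le_of_ne hb (Ne.symm h)
      rw [pvEuclid]
      simp only [h, ne_eq, not_false_eq_true, dite_true]
      rw [ih b (PySem.Int.mod a b)
        (by have := pvMod_natAbs_lt a b h; omega) hb (PySem.Int.mod_nonneg a hb')]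
      rw [PySem.Int.mod_eq_emod_of_pos hb', ← pvGcd_rec a b]

-- one fold step is one lcm step
theorem pvStep (A D : Nat) (hA : 0 < A) (hD : 0 < D) :
    PySem.Int.floordiv ((A : Int) * (D : Int)) (pvEuclid (A : Int) (D : Int))
      = (Nat.lcm A D : Int) := by
  rw [pvEuclid_eq (D : Int).natAbs (A : Int) (D : Int) le_rfl (by positivity) (by positivity)]
  rw [Int.gcd_natCast_natCast A D]
  rw [show (A : Int) * (D : Int) = ((A * D : Nat) : Int) by push_cast; ring]
  rw [PySem.Int.floordiv_natCast]
  rw [Nat.lcm]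

theorem pvFoldB (k : Nat) :
    (PySem.List.pyRange 2 ((k : Int) + 2) 1).foldl
      (fun L d => PySem.Int.floordiv (L * d) (pvEuclid L d)) 1 = (pvNL (k + 1) : Int) := by
  induction k with
  | zero =>
    rw [show ((0 : Nat) : Int) + 2 = 2 by norm_num]
    rw [PySem.List.pyRange_one_eq_nil (by omega)]
    simp [pvNL, Nat.lcm]
  | succ k ih =>
    rw [show (((k + 1 : Nat)) : Int) + 2 = ((k : Int) + 2) + 1 by push_cast; ring]
    rw [PySem.List.pyRange_one_succ_right (show (2:Int) ≤ (k : Int) + 2 by omega)]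
    rw [List.foldl_append]
    simp only [List.foldl]
    rw [ih]
    rw [show ((k : Int) + 2) = ((k + 2 : Nat) : Int) by push_cast; ring]
    rw [pvStep (pvNL (k + 1)) (k + 2) (pvNL_pos _) (by omega)]
    rfl

-- one fold step only grows a positive L and keeps it positive
theorem pvStep_facts (L d : Int) (hL : 0 < L) (hd : 0 < d) :
    L ≤ PySem.Int.floordiv (L * d) (pvEuclid L d) ∧
      0 < PySem.Int.floordiv (L * d) (pvEuclid L d) := by
  have hLc : L = (L.toNat : Int) := (Int.toNat_of_nonneg (by omega)).symm
  have hdc : d = (d.toNat : Int) := (Int.toNat_of_nonneg (by omega)).symm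
  rw [hLc, hdc, pvStep L.toNat d.toNat (by omega) (by omega)]
  have hpos : 0 < Nat.lcm L.toNat d.toNat := Nat.lcm_pos (by omega) (by omega)
  have hle : L.toNat ≤ Nat.lcm L.toNat d.toNat :=
    Nat.le_of_dvd hpos (Nat.dvd_lcm_left _ _)
  constructor
  · exact_mod_cast hle
  · exact_mod_cast hpos

theorem pvFoldl_ge (ds : List Int) : ∀ (L : Int), 0 < L → (∀ d ∈ ds, 0 < d) →
    L ≤ ds.foldl (fun L d => PySem.Int.floordiv (L * d) (pvEuclid L d)) L ∧
      0 < ds.foldl (fun L d => PySem.Int.floordiv (L * d) (pvEuclid L d)) L := by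
  induction ds with
  | nil => exact fun L hL _ => ⟨le_rfl, hL⟩
  | cons d ds ih =>
    intro L hL hpos
    have hd : 0 < d := hpos d List.mem_cons_self
    obtain ⟨h1, h2⟩ := pvStep_facts L d hL hd
    obtain ⟨h3, h4⟩ := ih _ h2 (fun x hx => hpos x (List.mem_cons_of_mem d hx))
    exact ⟨le_trans h1 h3, h4⟩

-- B's early-exit loop equals the full fold followed by the final test
theorem pvLoopB_eq (r : Int) (s : Int) : ∀ (fuel : Nat) (L d : Int), 0 < L → 2 ≤ d →
    fuel = (s + 1 - d).toNat →
    pvLoopB r s L d fuel =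
      if (PySem.List.pyRange d (s + 1) 1).foldl
          (fun L d => PySem.Int.floordiv (L * d) (pvEuclid L d)) L ≤ r
      then (PySem.List.pyRange d (s + 1) 1).foldl
          (fun L d => PySem.Int.floordiv (L * d) (pvEuclid L d)) L else -1 := by
  intro fuel
  induction fuel with
  | zero =>
    intro L d hL hd hfuel
    rw [PySem.List.pyRange_one_eq_nil (by omega : s + 1 ≤ d)]
    rfl
  | succ fuel ih =>
    intro L d hL hd hfuel
    have hds : d < s + 1 := by omega
    rw [PySem.List.pyRange_one_cons hds]
    obtain ⟨h1, h2⟩ := pvStep_facts L d hL (by omega)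
    simp only [pvLoopB, List.foldl]
    rcases em (L > r) with hgt | hgt
    · obtain ⟨h3, _⟩ := pvFoldl_ge (PySem.List.pyRange (d + 1) (s + 1) 1) _ h2
        (fun x hx => by rw [PySem.List.mem_pyRange_one] at hx; omega)
      rw [if_pos hgt, if_neg (by omega)]
    · rw [if_neg hgt]
      exact ih _ (d + 1) h2 (by omega) (by omega)

-- the inner for-loop returns n exactly when every d in [k..s] divides n …
theorem pvInner_some (n s : Int) (k : Int) (h1 : 1 ≤ k) (h2 : k ≤ s)
    (hall : ∀ d, k ≤ d → d ≤ s → d ∣ n) :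
    pvInnerA n s k (s + 1 - k).toNat = some n := by
  induction hN : (s - k).toNat generalizing k with
  | zero =>
    have hks : k = s := by omega
    subst hks
    rw [show (k + 1 - k).toNat = 1 by omega, pvInnerA]
    have hd : k ∣ n := hall k le_rfl h2
    simp [(PySem.Int.mod_eq_zero_iff_dvd n k).mpr hd]
  | succ m ih =>
    have hks : k < s := by omega
    rw [show (s + 1 - k).toNat = (s + 1 - (k + 1)).toNat + 1 by omega, pvInnerA]
    have hd : k ∣ n := hall k le_rfl h2
    simp only [(PySem.Int.mod_eq_zero_iff_dvd n k).mpr hd,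
      ne_eq, not_true_eq_false, if_false, show k ≠ s by omega]
    exact ih (k + 1) (by omega) (by omega) (fun d hk hd' => hall d (by omega) hd') (by omega)

-- … and none when some d in [k..s] does not
theorem pvInner_none (n s : Int) (k : Int) (h1 : 1 ≤ k) (h2 : k ≤ s)
    (hnot : ¬ ∀ d, k ≤ d → d ≤ s → d ∣ n) :
    pvInnerA n s k (s + 1 - k).toNat = none := by
  induction hN : (s - k).toNat generalizing k with
  | zero =>
    have hks : k = s := by omega
    subst hks
    have hd : ¬ k ∣ n := by
      intro hd
      exact hnot (fun d hk hd' => by rwa [show d = k by omega])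
    have hm : PySem.Int.mod n k ≠ 0 := fun hc => hd ((PySem.Int.mod_eq_zero_iff_dvd n k).mp hc)
    rw [show (k + 1 - k).toNat = 1 by omega, pvInnerA]
    simp [hm]
  | succ m ih =>
    have hks : k < s := by omega
    rw [show (s + 1 - k).toNat = (s + 1 - (k + 1)).toNat + 1 by omega, pvInnerA]
    by_cases hd : k ∣ n
    · have htail : ¬ ∀ d, k + 1 ≤ d → d ≤ s → d ∣ n := by
        intro hall
        exact hnot (fun d hk hd' => by
          rcases em (d = k) with h | h
          · rwa [h]
          · exact hall d (by omega) hd')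
      simp only [(PySem.Int.mod_eq_zero_iff_dvd n k).mpr hd,
        ne_eq, not_true_eq_false, if_false, show k ≠ s by omega]
      exact ih (k + 1) (by omega) (by omega) htail (by omega)
    · have hm : PySem.Int.mod n k ≠ 0 := fun hc => hd ((PySem.Int.mod_eq_zero_iff_dvd n k).mp hc)
      simp [hm]

-- "all of 1..s divide n" ⟺ "lcm(1..s) divides n", over Int, for n ≥ 0
theorem pvAll_dvd_iff (s n : Int) (hs : 1 ≤ s) (hn : 0 ≤ n) :
    (∀ d, 1 ≤ d → d ≤ s → d ∣ n) ↔ ((pvNL s.toNat : Int) ∣ n) := by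
  have hnn : n = (n.toNat : Int) := (Int.toNat_of_nonneg hn).symm
  constructor
  · intro h
    rw [hnn]
    have hdvd : pvNL s.toNat ∣ n.toNat := by
      apply pvDvd_NL
      intro d h1 h2
      have hdn := h (d : Int) (by omega) (by omega)
      rw [hnn] at hdn
      exact_mod_cast hdn
    exact_mod_cast hdvd
  · intro h d hd1 hd2
    have hdvd : d.toNat ∣ pvNL s.toNat := pvNL_dvd _ _ (by omega) (by omega)
    have hdvd' : (d : Int) ∣ (pvNL s.toNat : Int) := by
      have hc := Int.natCast_dvd_natCast.mpr hdvd
      rwa [Int.toNat_of_nonneg (by omega : (0:Int) ≤ d)] at hc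
    exact dvd_trans hdvd' h

-- s < 1: the inner range is empty, A counts n all the way up and returns -1
theorem pvLoop_nos (r s : Int) (hs : s < 1) :
    ∀ (fuel : Nat) (n : Int), pvLoopA r s n fuel = -1 := by
  intro fuel
  induction fuel with
  | zero => intro n; rfl
  | succ m ih =>
    intro n
    rw [pvLoopA, show (s + 1 - 1).toNat = 0 by omega]
    exact ih (n + 1)

-- r < lcm: no n ≤ r works, A returns -1
theorem pvLoop_fail (r s : Int) (hs : 1 ≤ s) (hr : r < (pvNL s.toNat : Int)) :
    ∀ (fuel : Nat) (n : Int), 1 ≤ n → fuel ≤ (r + 1 - n).toNat → pvLoopA r s n fuel = -1 := by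
  intro fuel
  induction fuel with
  | zero => intro n _ _; rfl
  | succ m ih =>
    intro n hn hfuel
    rw [pvLoopA]
    have hnd : ¬ (pvNL s.toNat : Int) ∣ n := by
      intro hd
      have := Int.le_of_dvd (by omega) hd
      omega
    have hnot : ¬ ∀ d, 1 ≤ d → d ≤ s → d ∣ n := by
      intro hall
      exact hnd ((pvAll_dvd_iff s n hs (by omega)).mp hall)
    have hinner := pvInner_none n s 1 le_rfl hs hnot
    rw [hinner]
    exact ih (n + 1) (by omega) (by omega)

-- lcm ≤ r: A climbs from n to lcm and returns it
theorem pvLoop_hit (r s : Int) (hs : 1 ≤ s) (hr : (pvNL s.toNat : Int) ≤ r) :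
    ∀ (m : Nat) (fuel : Nat) (n : Int), 1 ≤ n → n ≤ (pvNL s.toNat : Int) →
    m = ((pvNL s.toNat : Int) - n).toNat → fuel = (r + 1 - n).toNat →
    pvLoopA r s n fuel = (pvNL s.toNat : Int) := by
  intro m
  induction m with
  | zero =>
    intro fuel n hn hnL hm hfuel
    have hnL' : n = (pvNL s.toNat : Int) := by omega
    obtain ⟨f', hf'⟩ : ∃ f', fuel = f' + 1 := ⟨(r - n).toNat, by omega⟩
    rw [hf', pvLoopA]
    have hall : ∀ d, 1 ≤ d → d ≤ s → d ∣ n := by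
      rw [pvAll_dvd_iff s n hs (by omega), hnL']
    rw [pvInner_some n s 1 le_rfl hs hall]
    exact hnL'
  | succ m ih =>
    intro fuel n hn hnL hm hfuel
    have hlt : n < (pvNL s.toNat : Int) := by omega
    obtain ⟨f', hf'⟩ : ∃ f', fuel = f' + 1 := ⟨(r - n).toNat, by omega⟩
    rw [hf', pvLoopA]
    have hnd : ¬ (pvNL s.toNat : Int) ∣ n := by
      intro hd
      have := Int.le_of_dvd (by omega) hd
      omega
    have hnot : ¬ ∀ d, 1 ≤ d → d ≤ s → d ∣ n := by
      intro hall
      exact hnd ((pvAll_dvd_iff s n hs (by omega)).mp hall)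
    rw [pvInner_none n s 1 le_rfl hs hnot]
    exact ih f' (n + 1) (by omega) (by omega) (by omega) (by omega)

-- B's fold value is lcm(1..s) for s ≥ 1
theorem pvFold_eq (s : Int) (hs : 1 ≤ s) :
    (PySem.List.pyRange 2 (s + 1) 1).foldl
      (fun L d => PySem.Int.floordiv (L * d) (pvEuclid L d)) 1 = (pvNL s.toNat : Int) := by
  obtain ⟨k, hk⟩ : ∃ k : Nat, s = (k : Int) + 1 := ⟨(s - 1).toNat, by omega⟩
  subst hk
  rw [show ((k : Int) + 1 + 1) = (k : Int) + 2 by ring,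
      show ((k : Int) + 1).toNat = k + 1 by omega, pvFoldB k]

-- ===== VERDICT (by name: the statement is the Claim_ definition above) =====
theorem smallest_spec : Claim_equal_smallest := by
  intro r s _
  unfold Spec_smallest smallest smallest_alt
  rcases em (s < 1) with hs | hs
  · simp only [hs, if_true]
    exact pvLoop_nos r s hs _ 1
  · have hs1 : 1 ≤ s := by omega
    simp only [hs, if_false]
    rw [pvLoopB_eq r s (s + 1 - 2).toNat 1 2 one_pos le_rfl rfl]
    rw [pvFold_eq s hs1]
    have hL1 : 1 ≤ (pvNL s.toNat : Int) := by
      have := pvNL_pos s.toNat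
      omega
    rcases em ((pvNL s.toNat : Int) ≤ r) with hr | hr
    · simp only [hr, if_true]
      exact pvLoop_hit r s hs1 hr ((pvNL s.toNat : Int) - 1).toNat _ 1 le_rfl hL1
        (by omega) rfl
    · simp only [hr, if_false]
      exact pvLoop_fail r s hs1 (by omega) _ 1 le_rfl le_rfl
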